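-- pv_equiv track=rewrite | github.com/ioistired/python-snippets | zip_different_capitalizations_same_name.py | all_capitalizations
-- ===== SOURCE A (Python) =====
-- import zipfile, itertools
--
-- def all_capitalizations(s):
-- 	for capitalization_scheme in itertools.product((False, True), repeat=len(s)):
-- 		yield ''.join(
-- 				c.upper()
-- 				if should_capitalize
-- 				else c.lower()
-- 			for c, should_capitalize
-- 			in zip(s, capitalization_scheme))
-- ===== SOURCE B (Python) =====
-- def all_capitalizations(s):
--     def gen(i):
--         if i == len(s):
--             yield ''
--             return
--         c = s[i]
--         for rest in gen(i + 1):
--             yield c.lower() + rest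
--         for rest in gen(i + 1):
--             yield c.upper() + rest
--     return gen(0)
-- ===== Notes on version B (the rewrite author's own statement) =====
-- stated objective: simpler
-- what changed: Replaced the itertools.product-of-boolean-schemes pass (build all True/False tuples, then join-zip each against the string) with a direct recursive generator over the string suffix that prepends the lowercase then uppercase form of each character.
import Mathlib
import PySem

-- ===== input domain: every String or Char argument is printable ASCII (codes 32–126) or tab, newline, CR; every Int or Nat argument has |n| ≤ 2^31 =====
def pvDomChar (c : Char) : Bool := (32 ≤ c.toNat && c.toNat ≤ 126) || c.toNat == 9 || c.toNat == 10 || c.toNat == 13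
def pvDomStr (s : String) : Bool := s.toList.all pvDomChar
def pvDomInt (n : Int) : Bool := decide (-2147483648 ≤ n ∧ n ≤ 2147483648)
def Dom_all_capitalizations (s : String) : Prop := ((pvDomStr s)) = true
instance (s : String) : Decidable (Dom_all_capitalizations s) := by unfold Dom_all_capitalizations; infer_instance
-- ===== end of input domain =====

-- B replaces A's itertools.product-of-booleans pass with a direct recursion on the
-- string suffix (lowercase branch before uppercase), same output order; objective: simpler.

-- ===== PORT A =====
-- itertools.product((False, True), repeat=n), leftmost component varying slowest
def pvSchemes : Nat → List (List Bool)
  | 0 => [[]]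
  | n + 1 => [false, true].flatMap (fun b => (pvSchemes n).map (fun rest => b :: rest))

-- ''.join(c.upper() if should_capitalize else c.lower() for c, sc in zip(s, scheme))
def pvJoinZip : List Char → List Bool → List Char
  | c :: cs, b :: bs =>
      (if b then PySem.Chars.upperChar c else PySem.Chars.lowerChar c) :: pvJoinZip cs bs
  | _, _ => []

def all_capitalizations (s : String) : List String :=
  (pvSchemes s.toList.length).map (fun scheme => String.ofList (pvJoinZip s.toList scheme))

-- ===== PORT B =====
-- gen(i) of Source B, written as structural recursion on the suffix s[i:]
def pvGen : List Char → List String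
  | [] => [""]
  | c :: cs =>
      (pvGen cs).map (fun rest => String.ofList (PySem.Chars.lowerChar c :: rest.toList)) ++
      (pvGen cs).map (fun rest => String.ofList (PySem.Chars.upperChar c :: rest.toList))

def all_capitalizations_alt (s : String) : List String :=
  pvGen s.toList

-- ===== PRECONDITION & SPEC =====
def Spec_all_capitalizations (s : String) (out : List String) : Prop := out = all_capitalizations_alt s
instance (s : String) (out : List String) : Decidable (Spec_all_capitalizations s out) := by unfold Spec_all_capitalizations; infer_instance

-- ===== CLAIM (what is proved, stated in full; the proofs are below) =====
def Claim_equal_all_capitalizations : Prop := ∀ (s : String), Dom_all_capitalizations s → Spec_all_capitalizations s (all_capitalizations s)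

-- ===== LEMMAS AND PROOFS =====
theorem pvMain (l : List Char) :
    (pvSchemes l.length).map (fun scheme => String.ofList (pvJoinZip l scheme)) = pvGen l := by
  induction l with
  | nil => rfl
  | cons c cs ih =>
      simp only [List.length_cons, pvSchemes, List.flatMap_cons, List.flatMap_nil,
        List.append_nil, List.map_append, List.map_map, pvGen]
      congr 1 <;>
      · rw [← ih, List.map_map]
        refine List.map_congr_left (fun sch _ => ?_)
        simp [pvJoinZip, Function.comp]

-- ===== VERDICT (by name: the statement is the Claim_ definition above) =====
theorem all_capitalizations_spec : Claim_equal_all_capitalizations := by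
  intro s _
  show _ = _
  rw [all_capitalizations, all_capitalizations_alt, pvMain]
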